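-- pv_equiv track=rewrite | github.com/xoth42/QNN-hack | trash/tuple_triangle (1).py | inverted_pyramid
-- ===== SOURCE A (Python) =====
-- def generate_inner_list(z):
--     inner_list = []
--
--     # Block for ODD z
--     if z % 2 == 1:
--         # Since z is odd, the largest odd number <= z is simply z itself.
--         max_start = z
--         # i goes 1, 3, 5, ...
--         for i in range(1, max_start + 1, 2):
--             inner_list.append((i, i + 1))
--
--     # Block for EVEN z
--     elif z % 2 == 0:
--         # Since z is even, the largest even number <= z is simply z itself.
--         max_start = z
--         # i goes 2, 4, 6, ...
--         for i in range(2, max_start + 1, 2):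
--             inner_list.append((i, i + 1))
--
--     return inner_list
--
-- def inverted_pyramid(n):
--     """Gets tuples with the inverted pyramid entanglement algorythm"""
--     output_list = []
--     for x in range(1,n):
--         inner_list = generate_inner_list(x)
--         output_list.append(inner_list)
--     for y in range(n-2,0, -1):
--         inner_list = generate_inner_list(y)
--         output_list.append(inner_list)
--
--     return output_list
-- ===== SOURCE B (Python) =====
-- def inverted_pyramid(n):
--     """Gets tuples with the inverted pyramid entanglement algorythm"""
--     # Two parity rows evolve as stacks: each ascending step pushes one pair onto
--     # the row of matching parity; each descending step emits a row and pops one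
--     # pair off the opposite-parity row.  No per-row generation at all.
--     out = []
--     odd = []
--     even = []
--     for z in range(1, n):
--         if z % 2 == 1:
--             odd = odd + [(z, z + 1)]
--             out.append(odd)
--         else:
--             even = even + [(z, z + 1)]
--             out.append(even)
--     for y in range(n - 2, 0, -1):
--         if y % 2 == 1:
--             out.append(odd)
--             even = even[:-1]
--         else:
--             out.append(even)
--             odd = odd[:-1]
--     return out
-- ===== Notes on version B (the rewrite author's own statement) =====
-- stated objective: alternative
-- what changed: B drops the per-row generator entirely: it keeps two parity rows as stacks in a single state machine, pushing one pair per ascending step and emitting-then-popping per descending step, instead of A's regenerating every row from scratch with an inner loop.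
import Mathlib
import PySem

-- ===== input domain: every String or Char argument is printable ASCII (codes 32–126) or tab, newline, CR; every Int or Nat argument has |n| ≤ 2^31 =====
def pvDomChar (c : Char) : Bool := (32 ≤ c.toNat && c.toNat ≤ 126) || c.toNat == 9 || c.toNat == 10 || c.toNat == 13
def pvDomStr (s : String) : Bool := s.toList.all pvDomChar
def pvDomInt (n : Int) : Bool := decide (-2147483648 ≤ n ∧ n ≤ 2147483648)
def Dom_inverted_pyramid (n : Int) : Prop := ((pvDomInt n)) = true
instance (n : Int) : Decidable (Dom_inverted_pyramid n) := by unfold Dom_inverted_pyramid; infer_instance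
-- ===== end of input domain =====

-- B replaces A's per-row generator with a single state machine over two parity rows (push
-- ascending, emit-then-pop descending); equivalence is about the RETURN VALUE only (in Python
-- some of B's returned rows alias each other, A's are all fresh).

-- ===== PORT A =====
def generate_inner_list (z : Int) : List (Int × Int) :=
  if PySem.Int.mod z 2 == 1 then
    (PySem.List.pyRange 1 (z + 1) 2).foldl (fun acc i => acc ++ [(i, i + 1)]) []
  else if PySem.Int.mod z 2 == 0 then
    (PySem.List.pyRange 2 (z + 1) 2).foldl (fun acc i => acc ++ [(i, i + 1)]) []
  else []

def inverted_pyramid (n : Int) : List (List (Int × Int)) :=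
  (PySem.List.pyRange (n - 2) 0 (-1)).foldl
    (fun acc y => acc ++ [generate_inner_list y])
    ((PySem.List.pyRange 1 n 1).foldl (fun acc x => acc ++ [generate_inner_list x]) [])

-- ===== PORT B =====
-- loop state = (out, odd, even)
def pyramid_step_up (s : List (List (Int × Int)) × List (Int × Int) × List (Int × Int)) (z : Int) :
    List (List (Int × Int)) × List (Int × Int) × List (Int × Int) :=
  if PySem.Int.mod z 2 == 1 then
    (s.1 ++ [s.2.1 ++ [(z, z + 1)]], s.2.1 ++ [(z, z + 1)], s.2.2)
  else
    (s.1 ++ [s.2.2 ++ [(z, z + 1)]], s.2.1, s.2.2 ++ [(z, z + 1)])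

def pyramid_step_down (s : List (List (Int × Int)) × List (Int × Int) × List (Int × Int)) (y : Int) :
    List (List (Int × Int)) × List (Int × Int) × List (Int × Int) :=
  if PySem.Int.mod y 2 == 1 then
    (s.1 ++ [s.2.1], s.2.1, PySem.List.slice s.2.2 none (some (-1)))
  else
    (s.1 ++ [s.2.2], PySem.List.slice s.2.1 none (some (-1)), s.2.2)

def inverted_pyramid_alt (n : Int) : List (List (Int × Int)) :=
  ((PySem.List.pyRange (n - 2) 0 (-1)).foldl pyramid_step_down
    ((PySem.List.pyRange 1 n 1).foldl pyramid_step_up ([], [], []))).1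

-- ===== PRECONDITION & SPEC =====
def Spec_inverted_pyramid (n : Int) (out : List (List (Int × Int))) : Prop := out = inverted_pyramid_alt n
instance (n : Int) (out : List (List (Int × Int))) : Decidable (Spec_inverted_pyramid n out) := by unfold Spec_inverted_pyramid; infer_instance

-- ===== CLAIM (what is proved, stated in full; the proofs are below) =====
def Claim_equal_inverted_pyramid : Prop := ∀ (n : Int), Dom_inverted_pyramid n → Spec_inverted_pyramid n (inverted_pyramid n)

-- ===== LEMMAS AND PROOFS =====

-- B's invariant rows: after the loop has last touched index t, the odd-parity row is the row of
-- the largest odd number ≤ t, the even-parity row that of the largest even number ≤ t.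
def oddAt (t : Int) : List (Int × Int) :=
  generate_inner_list (if PySem.Int.mod t 2 == 1 then t else t - 1)
def evenAt (t : Int) : List (Int × Int) :=
  generate_inner_list (if PySem.Int.mod t 2 == 0 then t else t - 1)

theorem gen_nil (z : Int) (hz : z ≤ 0) : generate_inner_list z = [] := by
  unfold generate_inner_list
  rcases PySem.Int.mod_two_eq z with h | h <;>
    simp [PySem.List.pyRange_of_pos _ _ (by norm_num : (0:Int) < 2),
      show ¬((1:Int) < z + 1) by omega, show ¬((2:Int) < z + 1) by omega]

theorem pyRange_two_succ (a z : Int) (ha : a ≤ z) (hpar : (2:Int) ∣ (z - a)) :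
    PySem.List.pyRange a (z + 1) 2 = PySem.List.pyRange a (z - 1) 2 ++ [z] := by
  obtain ⟨k, hk⟩ := hpar
  have hk0 : 0 ≤ k := by omega
  rw [PySem.List.pyRange_of_pos a (z+1) (by norm_num), PySem.List.pyRange_of_pos a (z-1) (by norm_num)]
  have h1 : a < z + 1 := by omega
  rw [if_pos h1]
  have hcount1 : ((z + 1 - a + 2 - 1) / 2).toNat = k.toNat + 1 := by
    rw [show z + 1 - a + 2 - 1 = 2 * k + 2 by omega, show (2 * k + 2) / 2 = k + 1 by omega]; omega
  rw [hcount1, List.range_succ, List.map_append]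
  by_cases h2 : a < z - 1
  · rw [if_pos h2]
    rw [show ((z - 1 - a + 2 - 1) / 2).toNat = k.toNat by
      rw [show z - 1 - a + 2 - 1 = 2 * k by omega, show (2 * k) / 2 = k by omega]]
    simp
    omega
  · rw [if_neg h2]
    have hk1 : k.toNat = 0 := by omega
    simp [hk1]
    omega

theorem gen_rec (z : Int) (hz : 1 ≤ z) :
    generate_inner_list z = generate_inner_list (z - 2) ++ [(z, z + 1)] := by
  unfold generate_inner_list
  have hmod : PySem.Int.mod z 2 = z % 2 := PySem.Int.mod_eq_emod_of_pos (by norm_num)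
  have hmod2 : PySem.Int.mod (z - 2) 2 = (z - 2) % 2 := PySem.Int.mod_eq_emod_of_pos (by norm_num)
  rcases Int.emod_two_eq_zero_or_one z with h | h
  · have h2 : (z - 2) % 2 = 0 := by omega
    simp only [hmod, hmod2, h, h2, PySem.List.foldl_append_singleton_eq_map, List.nil_append,
      show ((0:Int) == 1) = false by decide, show ((0:Int) == 0) = true by decide,
      Bool.false_eq_true, if_false, if_true]
    rw [show z - 2 + 1 = z - 1 by ring, pyRange_two_succ 2 z (by omega) (by omega)]
    simp
  · have h2 : (z - 2) % 2 = 1 := by omega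
    simp only [hmod, hmod2, h, h2, PySem.List.foldl_append_singleton_eq_map, List.nil_append,
      show ((1:Int) == 1) = true by decide, if_true]
    rw [show z - 2 + 1 = z - 1 by ring, pyRange_two_succ 1 z (by omega) (by omega)]
    simp

theorem gen_dropLast (z : Int) (hz : 1 ≤ z) :
    (generate_inner_list z).dropLast = generate_inner_list (z - 2) := by
  rw [gen_rec z hz, List.dropLast_concat]

theorem step_up_eq (z : Int) (out : List (List (Int × Int))) (hz : 1 ≤ z) :
    pyramid_step_up (out, oddAt (z - 1), evenAt (z - 1)) z =
      (out ++ [generate_inner_list z], oddAt z, evenAt z) := by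
  unfold pyramid_step_up oddAt evenAt
  have hmod : PySem.Int.mod z 2 = z % 2 := PySem.Int.mod_eq_emod_of_pos (by norm_num)
  have hmod1 : PySem.Int.mod (z - 1) 2 = (z - 1) % 2 := PySem.Int.mod_eq_emod_of_pos (by norm_num)
  rcases Int.emod_two_eq_zero_or_one z with h | h
  · have h1 : (z - 1) % 2 = 1 := by omega
    simp only [hmod, hmod1, h, h1,
      show ((0:Int) == 1) = false by decide, show ((0:Int) == 0) = true by decide,
      show ((1:Int) == 1) = true by decide, show ((1:Int) == 0) = false by decide,
      Bool.false_eq_true, if_false, if_true]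
    rw [show z - 1 - 1 = z - 2 by ring, ← gen_rec z hz]
  · have h1 : (z - 1) % 2 = 0 := by omega
    simp only [hmod, hmod1, h, h1,
      show ((0:Int) == 1) = false by decide, show ((0:Int) == 0) = true by decide,
      show ((1:Int) == 1) = true by decide, show ((1:Int) == 0) = false by decide,
      Bool.false_eq_true, if_false, if_true]
    rw [show z - 1 - 1 = z - 2 by ring, ← gen_rec z hz]

theorem step_down_eq (y : Int) (out : List (List (Int × Int))) (hy : 1 ≤ y) :
    pyramid_step_down (out, oddAt (y + 1), evenAt (y + 1)) y =
      (out ++ [generate_inner_list y], oddAt y, evenAt y) := by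
  unfold pyramid_step_down oddAt evenAt
  have hmod : PySem.Int.mod y 2 = y % 2 := PySem.Int.mod_eq_emod_of_pos (by norm_num)
  have hmod1 : PySem.Int.mod (y + 1) 2 = (y + 1) % 2 := PySem.Int.mod_eq_emod_of_pos (by norm_num)
  rcases Int.emod_two_eq_zero_or_one y with h | h
  · have h1 : (y + 1) % 2 = 1 := by omega
    simp only [hmod, hmod1, h, h1,
      show ((0:Int) == 1) = false by decide, show ((0:Int) == 0) = true by decide,
      show ((1:Int) == 1) = true by decide, show ((1:Int) == 0) = false by decide,
      Bool.false_eq_true, if_false, if_true]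
    rw [PySem.List.slice_to_neg_one, gen_dropLast (y + 1) (by omega),
      show y + 1 - 2 = y - 1 by ring, show y + 1 - 1 = y by ring]
  · have h1 : (y + 1) % 2 = 0 := by omega
    simp only [hmod, hmod1, h, h1,
      show ((0:Int) == 1) = false by decide, show ((0:Int) == 0) = true by decide,
      show ((1:Int) == 1) = true by decide, show ((1:Int) == 0) = false by decide,
      Bool.false_eq_true, if_false, if_true]
    rw [PySem.List.slice_to_neg_one, gen_dropLast (y + 1) (by omega),
      show y + 1 - 2 = y - 1 by ring, show y + 1 - 1 = y by ring]

theorem asc_inv (k : Nat) : ∀ (z m : Int) (out : List (List (Int × Int))),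
    1 ≤ z → z ≤ m → (m - z).toNat = k →
    (PySem.List.pyRange z m 1).foldl pyramid_step_up (out, oddAt (z - 1), evenAt (z - 1)) =
      (out ++ (PySem.List.pyRange z m 1).map generate_inner_list, oddAt (m - 1), evenAt (m - 1)) := by
  induction k with
  | zero =>
    intro z m out hz hzm hk
    have : z = m := by omega
    subst this
    rw [PySem.List.pyRange_one_eq_nil le_rfl]
    simp
  | succ k ih =>
    intro z m out hz hzm hk
    have hlt : z < m := by omega
    rw [PySem.List.pyRange_one_cons hlt]
    simp only [List.foldl_cons, List.map_cons]
    rw [step_up_eq z out hz]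
    have := ih (z + 1) m (out ++ [generate_inner_list z]) (by omega) (by omega) (by omega)
    rw [show z + 1 - 1 = z by ring] at this
    rw [this, List.append_assoc]
    rfl

theorem desc_inv (k : Nat) : ∀ (y : Int) (out : List (List (Int × Int))),
    y.toNat = k →
    ((PySem.List.pyRange y 0 (-1)).foldl pyramid_step_down (out, oddAt (y + 1), evenAt (y + 1))).1 =
      out ++ (PySem.List.pyRange y 0 (-1)).map generate_inner_list := by
  induction k with
  | zero =>
    intro y out hk
    rw [PySem.List.pyRange_neg_one_eq_nil (by omega)]
    simp
  | succ k ih =>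
    intro y out hk
    have hy : 1 ≤ y := by omega
    rw [PySem.List.pyRange_neg_one_cons (by omega)]
    simp only [List.foldl_cons, List.map_cons]
    rw [step_down_eq y out hy]
    have := ih (y - 1) (out ++ [generate_inner_list y]) (by omega)
    rw [show y - 1 + 1 = y by ring] at this
    rw [this, List.append_assoc]
    rfl

theorem main_eq (n : Int) : inverted_pyramid n = inverted_pyramid_alt n := by
  unfold inverted_pyramid inverted_pyramid_alt
  by_cases hn : 2 ≤ n
  · have hstart : (([], [], []) : List (List (Int × Int)) × List (Int × Int) × List (Int × Int)) =
        ([], oddAt (1 - 1), evenAt (1 - 1)) := by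
      unfold oddAt evenAt
      norm_num [gen_nil 0 (by norm_num), gen_nil (-1) (by norm_num)]
    rw [hstart, asc_inv (n - 1).toNat 1 n [] (by norm_num) (by omega) (by omega)]
    rw [show n - 1 = n - 2 + 1 by ring]
    rw [desc_inv (n - 2).toNat (n - 2) _ rfl]
    rw [PySem.List.foldl_append_singleton_eq_map, PySem.List.foldl_append_singleton_eq_map]
  · rw [PySem.List.pyRange_one_eq_nil (by omega : n ≤ 1),
        PySem.List.pyRange_neg_one_eq_nil (by omega : n - 2 ≤ 0)]
    rfl

-- ===== VERDICT (by name: the statement is the Claim_ definition above) =====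
theorem inverted_pyramid_spec : Claim_equal_inverted_pyramid := by
  intro n _
  unfold Spec_inverted_pyramid
  exact main_eq n
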